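-- pv_equiv track=rewrite | github.com/wmww/wayland-debug | core/letter_id_generator.py | letter_id_to_number
-- ===== SOURCE A (Python) =====
-- def letter_id_to_number(text: str) -> int:
--     text = text.lower()
--     assert text, 'empty string given to letter_id_to_number()'
--     result = -1
--     for c in text:
--         result = (result + 1) * 26
--         v = ord(c) - ord('a')
--         assert v >= 0 and v < 26, 'non-letter character in input to letter_id_to_number(): "' + text + '"'
--         result += v
--     return result
-- ===== SOURCE B (Python) =====
-- def letter_id_to_number(text: str) -> int:
--     text = text.lower()
--     assert text, 'empty string given to letter_id_to_number()'
--     total = 0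
--     power = 1
--     for c in reversed(text):
--         v = ord(c) - ord('a')
--         assert v >= 0 and v < 26, 'non-letter character in input to letter_id_to_number(): "' + text + '"'
--         total += (v + 1) * power
--         power *= 26
--     return total - 1
-- ===== Notes on version B (the rewrite author's own statement) =====
-- stated objective: alternative
-- what changed: Replaces the left-to-right Horner accumulator ((r+1)*26+v) by a right-to-left positional base-26 sum with an explicit running power of 26, returning the sum minus 1.
import Mathlib
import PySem

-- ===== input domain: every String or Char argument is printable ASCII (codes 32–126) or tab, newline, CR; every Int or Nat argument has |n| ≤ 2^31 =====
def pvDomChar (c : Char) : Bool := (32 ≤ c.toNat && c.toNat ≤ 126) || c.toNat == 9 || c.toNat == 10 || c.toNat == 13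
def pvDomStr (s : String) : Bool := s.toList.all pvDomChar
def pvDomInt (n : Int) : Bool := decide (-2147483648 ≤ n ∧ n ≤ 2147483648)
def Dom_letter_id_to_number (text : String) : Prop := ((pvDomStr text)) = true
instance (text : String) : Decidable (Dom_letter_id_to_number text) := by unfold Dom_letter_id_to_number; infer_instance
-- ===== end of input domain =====

-- B replaces A's Horner accumulator by a right-to-left positional base-26 sum with a running power (alternative decomposition, same cost).

-- ===== PORT A =====
-- result = -1; for c in text.lower(): result = (result+1)*26 + (ord(c)-97)
def letter_id_to_number (text : String) : Int :=
  (PySem.Chars.lower text.toList).foldl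
    (fun result c => (result + 1) * 26 + ((c.toNat : Int) - 97)) (-1)

-- ===== PORT B =====
-- total = 0; power = 1; for c in reversed(text.lower()): total += (ord(c)-97+1)*power; power *= 26; return total - 1
def letter_id_to_number_alt (text : String) : Int :=
  ((PySem.Chars.lower text.toList).reverse.foldl
    (fun tp c => (tp.1 + (((c.toNat : Int) - 97) + 1) * tp.2, tp.2 * 26))
    ((0 : Int), (1 : Int))).1 - 1

-- ===== PRECONDITION & SPEC =====
-- Pre_ excludes exactly the inputs where Python A raises AssertionError: the empty string,
-- and strings whose lowercased form contains a character outside 'a'..'z'.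
def Pre_letter_id_to_number (text : String) : Prop :=
  text.toList ≠ [] ∧
  (PySem.Chars.lower text.toList).all (fun c => 97 ≤ c.toNat && c.toNat ≤ 122) = true
instance (text : String) : Decidable (Pre_letter_id_to_number text) := by
  unfold Pre_letter_id_to_number; infer_instance
def pvWitness_letter_id_to_number : String := "ab"

def Spec_letter_id_to_number (text : String) (out : Int) : Prop := out = letter_id_to_number_alt text
instance (text : String) (out : Int) : Decidable (Spec_letter_id_to_number text out) := by unfold Spec_letter_id_to_number; infer_instance

-- ===== CLAIM (what is proved, stated in full; the proofs are below) =====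
def Claim_equal_letter_id_to_number : Prop := ∀ (text : String), Dom_letter_id_to_number text → Pre_letter_id_to_number text → Spec_letter_id_to_number text (letter_id_to_number text)

-- ===== LEMMAS AND PROOFS =====

-- little-endian base-26 value of a character list with digits (ord c - 97 + 1)
def pvLE : List Char → Int
  | [] => 0
  | c :: t => (((c.toNat : Int) - 97) + 1) + 26 * pvLE t

theorem pvLE_append (c : Char) :
    ∀ (xs : List Char), pvLE (xs ++ [c]) = pvLE xs + (((c.toNat : Int) - 97) + 1) * 26 ^ xs.length := by
  intro xs
  induction xs with
  | nil => simp [pvLE]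
  | cons x t ih => simp only [List.cons_append, pvLE, ih, List.length_cons, pow_succ]; ring

-- B's fold with running power computes the little-endian value
theorem pv_fold_eq_pvLE :
    ∀ (xs : List Char) (t p : Int),
      (xs.foldl (fun tp c => (tp.1 + (((c.toNat : Int) - 97) + 1) * tp.2, tp.2 * 26)) (t, p)).1
        = t + p * pvLE xs := by
  intro xs
  induction xs with
  | nil => intro t p; simp [pvLE]
  | cons c s ih => intro t p; simp only [List.foldl_cons, ih, pvLE]; ring

-- A's Horner accumulator equals the little-endian value of the reversed list
theorem pv_horner_eq_pvLE_reverse :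
    ∀ (l : List Char) (r : Int),
      l.foldl (fun result c => (result + 1) * 26 + ((c.toNat : Int) - 97)) r
        = (r + 1) * 26 ^ l.length + pvLE l.reverse - 1 := by
  intro l
  induction l with
  | nil => intro r; simp [pvLE]
  | cons c t ih =>
      intro r
      simp only [List.foldl_cons, ih, List.reverse_cons, pvLE_append, List.length_reverse,
        List.length_cons, pow_succ]
      ring

-- ===== VERDICT (by name: the statement is the Claim_ definition above) =====
theorem letter_id_to_number_spec : Claim_equal_letter_id_to_number := by
  intro text _ _
  unfold Spec_letter_id_to_number letter_id_to_number letter_id_to_number_alt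
  rw [pv_horner_eq_pvLE_reverse, pv_fold_eq_pvLE]
  ring
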